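-- pv_equiv track=rewrite | github.com/SYBL99/Diplom | main.py | savage_criterion
-- ===== SOURCE A (Python) =====
-- def savage_criterion(matrix):
--     max_mass = []
--     for j in range(len(matrix[0])):
--         buff = []
--         for i in range(len(matrix)):
--             buff.append(matrix[i][j])
--         max_mass.append(max(buff))
--     risk_mass = []
--     for i in range(len(matrix)):
--         risk_mass.append(matrix[i].copy())
--     for j in range(len(matrix[0])):
--         for i in range(len(matrix)):
--             risk_mass[i][j] = max_mass[j] - risk_mass[i][j]
--     max_mass = []
--     for i in range(len(matrix)):
--         max_mass.append(max(risk_mass[i]))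
--     return max_mass.index(min(max_mass))
-- ===== SOURCE B (Python) =====
-- def savage_criterion(matrix):
--     regrets = None
--     for col in zip(*matrix):
--         c = max(col)
--         if regrets is None:
--             regrets = [c - x for x in col]
--         else:
--             regrets = [max(r, c - x) for r, x in zip(regrets, col)]
--     return min(enumerate(regrets), key=lambda p: p[1])[0]
-- ===== Notes on version B (the rewrite author's own statement) =====
-- stated objective: alternative
-- what changed: B is column-streaming: it iterates over zip(*matrix) once, folding each column into a single running per-row regret vector (initialised from the first column), and finishes with min(enumerate(regrets), key=value); A instead runs five staged passes — transpose into buffers for column maxima, copy the matrix, rewrite the copy in place into the regret matrix, take row maxima, then list.index of the minimum.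
-- outside the precondition, e.g. on savage_criterion([[1], [2, 3]]): A returns 0, B returns 1
import Mathlib
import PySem

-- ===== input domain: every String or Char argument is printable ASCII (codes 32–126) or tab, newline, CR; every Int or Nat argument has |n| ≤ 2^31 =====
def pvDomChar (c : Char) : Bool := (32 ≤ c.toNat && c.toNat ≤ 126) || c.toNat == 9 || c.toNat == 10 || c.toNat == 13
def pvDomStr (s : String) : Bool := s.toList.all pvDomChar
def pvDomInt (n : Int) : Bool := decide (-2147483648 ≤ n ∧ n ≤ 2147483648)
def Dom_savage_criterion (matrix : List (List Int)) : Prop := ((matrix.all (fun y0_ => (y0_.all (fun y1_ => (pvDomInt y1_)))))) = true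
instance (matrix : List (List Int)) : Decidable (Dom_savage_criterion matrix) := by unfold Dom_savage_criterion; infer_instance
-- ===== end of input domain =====

-- Savage minimax-regret criterion: index of the row minimising its maximal regret.
-- B is column-streaming: it folds the transposed columns (zip(*matrix)) into one running
-- per-row regret vector and finishes with min(enumerate(..), key), instead of A's five
-- staged passes (transpose buffers, matrix copy, in-place regret rewrite, row maxima, index of min).

-- ===== PORT A =====
def savage_criterion (matrix : List (List Int)) : Int :=
  -- max_mass: column maxima, built column by column from a transposed buffer
  let max_mass : List Int :=
    (PySem.List.pyRange 0 ((PySem.List.pyGetD matrix 0 []).length : Int) 1).map (fun j =>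
      let buff : List Int :=
        (PySem.List.pyRange 0 (matrix.length : Int) 1).map (fun i =>
          PySem.List.pyGetD (PySem.List.pyGetD matrix i []) j 0)
      (PySem.List.max? buff (fun x => x)).getD 0)
  -- risk_mass: a copy of the matrix, then rewritten in place to the regrets
  let risk_mass : List (List Int) :=
    (PySem.List.pyRange 0 (matrix.length : Int) 1).map (fun i => PySem.List.pyGetD matrix i [])
  let risk_mass : List (List Int) :=
    (PySem.List.pyRange 0 ((PySem.List.pyGetD matrix 0 []).length : Int) 1).foldl (fun rm j =>
      (PySem.List.pyRange 0 (matrix.length : Int) 1).foldl (fun rm i =>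
        PySem.List.pySetD rm i
          (PySem.List.pySetD (PySem.List.pyGetD rm i []) j
            (PySem.List.pyGetD max_mass j 0 - PySem.List.pyGetD (PySem.List.pyGetD rm i []) j 0))) rm)
      risk_mass
  -- max_mass (reused name): the row maxima of the regret matrix
  let max_mass2 : List Int :=
    (PySem.List.pyRange 0 (matrix.length : Int) 1).map (fun i =>
      (PySem.List.max? (PySem.List.pyGetD risk_mass i []) (fun x => x)).getD 0)
  ((PySem.List.index? max_mass2 ((PySem.List.min? max_mass2 (fun x => x)).getD 0)).getD 0 : Int)

-- ===== PORT B =====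
-- zip(*matrix): columns of the matrix, truncated at the shortest row.
-- Structural recursion on a fuel bound (the first row's length bounds the column count).
def zipStar : Nat -> List (List Int) -> List (List Int)
  | 0, _ => []
  | fuel+1, m =>
    if (m.isEmpty || m.any (fun r => r.isEmpty)) then []
    else (m.map (fun r => r.headD 0)) :: zipStar fuel (m.map (fun r => r.tail))

def savage_criterion_alt (matrix : List (List Int)) : Int :=
  let regrets : Option (List Int) :=
    (zipStar (matrix.headD []).length matrix).foldl (fun reg col =>
      let c : Int := (PySem.List.max? col (fun y => y)).getD 0
      match reg with
      | none => some (col.map (fun x => c - x))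
      | some r => some ((r.zip col).map (fun p => max p.1 (c - p.2)))) none
  match regrets with
  | none => 0   -- Python raises here (no columns were seen); excluded by Pre_
  | some r =>
      ((PySem.List.min? (PySem.List.enumerate r 0) (fun p => p.2)).getD (0, 0)).1

-- ===== PRECONDITION & SPEC =====
-- Pre_ excludes: the empty matrix and matrices whose first row is empty (A raises
-- IndexError/ValueError), rows shorter than the first row (A raises IndexError), and
-- ragged matrices whose later rows are LONGER than the first row — there A still returns
-- a value, but one polluted by untouched raw payoffs left in the copied rows, an accident
-- of A's in-place rewrite that no caller would specify.
def Pre_savage_criterion (matrix : List (List Int)) : Prop :=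
  matrix ≠ [] ∧ (matrix.getD 0 []) ≠ [] ∧
    ∀ row ∈ matrix, row.length = (matrix.getD 0 []).length
instance (matrix : List (List Int)) : Decidable (Pre_savage_criterion matrix) := by
  unfold Pre_savage_criterion; infer_instance

def pvWitness_savage_criterion : List (List Int) := [[3, 1], [2, 4]]

def Spec_savage_criterion (matrix : List (List Int)) (out : Int) : Prop := out = savage_criterion_alt matrix
instance (matrix : List (List Int)) (out : Int) : Decidable (Spec_savage_criterion matrix out) := by unfold Spec_savage_criterion; infer_instance

-- ===== CLAIM (what is proved, stated in full; the proofs are below) =====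
def Claim_equal_savage_criterion : Prop := ∀ (matrix : List (List Int)), Dom_savage_criterion matrix → Pre_savage_criterion matrix → Spec_savage_criterion matrix (savage_criterion matrix)

-- ===== LEMMAS AND PROOFS =====

-- generic: map over range of reads = map
theorem map_get_pyRange {α β : Type} (h : α → β) (d : α) (xs : List α) :
    (PySem.List.pyRange 0 (xs.length : Int) 1).map (fun i => h (PySem.List.pyGetD xs i d)) = xs.map h := by
  have := PySem.List.map_pyGetD_pyRange_zero' (xs := xs) (d := d)
  calc (PySem.List.pyRange 0 (xs.length : Int) 1).map (fun i => h (PySem.List.pyGetD xs i d))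
      = ((PySem.List.pyRange 0 (xs.length : Int) 1).map (fun i => PySem.List.pyGetD xs i d)).map h := by
        rw [List.map_map]; rfl
    _ = xs.map h := by rw [this]

theorem set_append_cons {α : Type} (pre : List α) (x : α) (t : List α) (v : α) :
    (pre ++ x :: t).set pre.length v = pre ++ v :: t := by
  induction pre with
  | nil => rfl
  | cons p ps ih => simp [ih]

theorem getD_append_length {α : Type} (pre : List α) (x : α) (t : List α) (d : α) :
    (pre ++ x :: t).getD pre.length d = x := by
  simp [List.getD]

-- inner fold: updating each position i once, left to right, is map
theorem setmap_fold {α : Type} (f : α → α) (d : α) :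
    ∀ (suf pre : List α),
    (PySem.List.pyRange (pre.length : Int) ((pre.length : Int) + suf.length) 1).foldl
        (fun rm i => PySem.List.pySetD rm i (f (PySem.List.pyGetD rm i d))) (pre ++ suf)
      = pre ++ suf.map f := by
  intro suf
  induction suf with
  | nil => intro pre; simp [PySem.List.pyRange_one_eq_nil]
  | cons x t ih =>
    intro pre
    rw [PySem.List.pyRange_one_cons (by push_cast [List.length_cons]; omega)]
    simp only [List.foldl_cons]
    have hget : PySem.List.pyGetD (pre ++ x :: t) (pre.length : Int) d = x := by
      rw [PySem.List.pyGetD_natCast]; exact getD_append_length pre x t d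
    have hset : PySem.List.pySetD (pre ++ x :: t) (pre.length : Int) (f x) = pre ++ f x :: t := by
      rw [PySem.List.pySetD_natCast]; exact set_append_cons pre x t (f x)
    rw [hget, hset]
    have h2 : (pre ++ f x :: t) = (pre ++ [f x]) ++ t := by simp
    have h3 : ((pre.length : Int) + 1) = (((pre ++ [f x]).length : Int)) := by simp
    have h4 : ((pre.length : Int) + ((x :: t).length : Int)) = ((pre ++ [f x]).length : Int) + (t.length : Int) := by
      simp; omega
    rw [h2, h3, h4, ih (pre ++ [f x])]
    simp

-- per-row column fold: each cell j rewritten once to w j - row[j]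
def rowRegret (w : Int → Int) : Int → List Int → List Int
  | _, [] => []
  | j0, x :: t => (w j0 - x) :: rowRegret w (j0 + 1) t

theorem colfold (w : Int → Int) :
    ∀ (suf pre : List Int),
    (PySem.List.pyRange (pre.length : Int) ((pre.length : Int) + suf.length) 1).foldl
        (fun r j => PySem.List.pySetD r j (w j - PySem.List.pyGetD r j 0)) (pre ++ suf)
      = pre ++ rowRegret w (pre.length : Int) suf := by
  intro suf
  induction suf with
  | nil => intro pre; simp [PySem.List.pyRange_one_eq_nil, rowRegret]
  | cons x t ih =>
    intro pre
    rw [PySem.List.pyRange_one_cons (by push_cast [List.length_cons]; omega)]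
    simp only [List.foldl_cons]
    have hget : PySem.List.pyGetD (pre ++ x :: t) (pre.length : Int) 0 = x := by
      rw [PySem.List.pyGetD_natCast]; exact getD_append_length pre x t 0
    have hset : PySem.List.pySetD (pre ++ x :: t) (pre.length : Int) (w (pre.length : Int) - x)
        = pre ++ (w (pre.length : Int) - x) :: t := by
      rw [PySem.List.pySetD_natCast]; exact set_append_cons pre x t _
    rw [hget, hset]
    have h2 : (pre ++ (w (pre.length : Int) - x) :: t) = (pre ++ [w (pre.length : Int) - x]) ++ t := by simp
    have h3 : ((pre.length : Int) + 1) = (((pre ++ [w (pre.length : Int) - x]).length : Int)) := by simp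
    have h4 : ((pre.length : Int) + ((x :: t).length : Int))
        = ((pre ++ [w (pre.length : Int) - x]).length : Int) + (t.length : Int) := by
      simp; omega
    rw [h2, h3, h4, ih]
    simp [rowRegret]

theorem setmap_fold_zero {α : Type} (f : α → α) (d : α) (xs : List α) :
    (PySem.List.pyRange 0 (xs.length : Int) 1).foldl
        (fun rm i => PySem.List.pySetD rm i (f (PySem.List.pyGetD rm i d))) xs
      = xs.map f := by
  have h := setmap_fold f d xs []
  simpa using h

theorem outer_fold (N : Nat) (w : Int → Int) (js : List Int) :
    ∀ (rm : List (List Int)), rm.length = N →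
    js.foldl (fun rm j =>
        (PySem.List.pyRange 0 (N : Int) 1).foldl (fun rm i =>
          PySem.List.pySetD rm i
            (PySem.List.pySetD (PySem.List.pyGetD rm i []) j
              (w j - PySem.List.pyGetD (PySem.List.pyGetD rm i []) j 0))) rm) rm
      = rm.map (fun row => js.foldl (fun r j =>
          PySem.List.pySetD r j (w j - PySem.List.pyGetD r j 0)) row) := by
  induction js with
  | nil => intro rm _; simp
  | cons j jt ih =>
    intro rm hlen
    simp only [List.foldl_cons]
    have hstep :
        (PySem.List.pyRange 0 (N : Int) 1).foldl (fun rm i =>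
          PySem.List.pySetD rm i
            (PySem.List.pySetD (PySem.List.pyGetD rm i []) j
              (w j - PySem.List.pyGetD (PySem.List.pyGetD rm i []) j 0))) rm
        = rm.map (fun row => PySem.List.pySetD row j (w j - PySem.List.pyGetD row j 0)) := by
      rw [← hlen]
      exact setmap_fold_zero (fun row => PySem.List.pySetD row j (w j - PySem.List.pyGetD row j 0)) [] rm
    rw [hstep, ih _ (by simp [hlen])]
    rw [List.map_map]
    rfl

def runMinV : List Int → Int → Int → Int → Int × Int
  | [], bi, bv, _ => (bi, bv)
  | x :: t, bi, bv, k => if x < bv then runMinV t k x (k + 1) else runMinV t bi bv (k + 1)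

theorem foldl_min_le_init : ∀ (t : List Int) (b : Int), t.foldl min b ≤ b := by
  intro t
  induction t with
  | nil => intro b; simp
  | cons x ts ih => intro b; simp only [List.foldl_cons]
                    exact le_trans (ih (min b x)) (min_le_left b x)

theorem foldl_min_eq_or_mem : ∀ (t : List Int) (b : Int), t.foldl min b = b ∨ t.foldl min b ∈ t := by
  intro t
  induction t with
  | nil => intro b; simp
  | cons x ts ih =>
    intro b
    simp only [List.foldl_cons]
    rcases ih (min b x) with h | h
    · rcases le_total b x with hbx | hxb
      · left; rw [h]; exact min_eq_left hbx
      · right; rw [h]; simp [min_eq_right hxb]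
    · right; simp [h]

theorem core_argmin : ∀ (vs : List Int) (bv bi k : Int),
    (runMinV vs bi bv k).1 =
      if vs.foldl min bv < bv
      then k + (((PySem.List.index? vs (vs.foldl min bv)).getD 0 : Nat) : Int)
      else bi := by
  intro vs
  induction vs with
  | nil => intro bv bi k; simp [runMinV]
  | cons x t ih =>
    intro bv bi k
    simp only [List.foldl_cons, runMinV]
    by_cases hx : x < bv
    · rw [if_pos hx, ih]
      rw [min_eq_right (le_of_lt hx)]
      by_cases hm : t.foldl min x < x
      · rw [if_pos hm, if_pos (lt_trans hm hx)]
        have hne : x ≠ t.foldl min x := by omega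
        rw [PySem.List.index?_cons_of_ne t hne]
        have hmem : t.foldl min x ∈ t := by
          rcases foldl_min_eq_or_mem t x with h | h
          · omega
          · exact h
        obtain ⟨i, hi⟩ := Option.isSome_iff_exists.mp ((PySem.List.index?_isSome_iff _ _).mpr hmem)
        rw [hi]
        simp only [Option.map_some, Option.getD_some]
        push_cast; ring
      · rw [if_neg hm]
        have heq : t.foldl min x = x := le_antisymm (foldl_min_le_init t x) (by omega)
        rw [heq, if_pos hx, PySem.List.index?_cons_self]
        simp
    · rw [if_neg hx, ih]
      rw [min_eq_left (by omega)]
      by_cases hm : t.foldl min bv < bv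
      · rw [if_pos hm, if_pos hm]
        have hne : x ≠ t.foldl min bv := by omega
        rw [PySem.List.index?_cons_of_ne t hne]
        have hmem : t.foldl min bv ∈ t := by
          rcases foldl_min_eq_or_mem t bv with h | h
          · omega
          · exact h
        obtain ⟨i, hi⟩ := Option.isSome_iff_exists.mp ((PySem.List.index?_isSome_iff _ _).mpr hmem)
        rw [hi]
        simp only [Option.map_some, Option.getD_some]
        push_cast; ring
      · rw [if_neg hm, if_neg hm]

theorem colfold_zero (w : Int → Int) (row : List Int) :
    (PySem.List.pyRange 0 (row.length : Int) 1).foldl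
        (fun r j => PySem.List.pySetD r j (w j - PySem.List.pyGetD r j 0)) row
      = rowRegret w 0 row := by
  have h := colfold w row []
  simpa using h

theorem rowRegret_length (w : Int → Int) : ∀ (row : List Int) (j0 : Int),
    (rowRegret w j0 row).length = row.length := by
  intro row
  induction row with
  | nil => intro j0; rfl
  | cons x t ih => intro j0; simp [rowRegret, ih]

theorem rowRegret_getElem (w : Int → Int) : ∀ (row : List Int) (j0 : Int) (k : Nat)
    (hk : k < row.length),
    (rowRegret w j0 row)[k]'(by rw [rowRegret_length]; exact hk) = w (j0 + k) - row[k] := by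
  intro row
  induction row with
  | nil => intro j0 k hk; simp at hk
  | cons x t ih =>
    intro j0 k hk
    cases k with
    | zero => simp [rowRegret]
    | succ m =>
      have := ih (j0 + 1) m (by simpa using hk)
      simp [rowRegret, this]
      ring_nf

theorem argmin_bridge (gx : Int) (gs : List Int) :
    (((PySem.List.index? (gx :: gs) (gs.foldl min gx)).getD 0 : Nat) : Int)
      = (runMinV gs 0 gx 1).1 := by
  rw [core_argmin]
  by_cases h : gs.foldl min gx < gx
  · rw [if_pos h]
    have hne : gx ≠ gs.foldl min gx := by omega
    rw [PySem.List.index?_cons_of_ne gs hne]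
    have hmem : gs.foldl min gx ∈ gs := by
      rcases foldl_min_eq_or_mem gs gx with h' | h'
      · omega
      · exact h'
    obtain ⟨i, hi⟩ := Option.isSome_iff_exists.mp ((PySem.List.index?_isSome_iff _ _).mpr hmem)
    rw [hi]
    simp only [Option.map_some, Option.getD_some]
    push_cast; ring
  · rw [if_neg h]
    have heq : gs.foldl min gx = gx := le_antisymm (foldl_min_le_init gs gx) (by omega)
    rw [heq, PySem.List.index?_cons_self]
    simp

-- A's value, reduced to the first-argmin recursion runMinV over the row maxima of the regrets
theorem A_to_runMin (cm : List Int) (r0 : List Int) (rest : List (List Int))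
    (hlen : ∀ row ∈ (r0 :: rest), row.length = r0.length) :
    (((PySem.List.index?
        ((PySem.List.pyRange 0 (((r0 :: rest) : List (List Int)).length : Int) 1).map (fun i =>
          (PySem.List.max?
            (PySem.List.pyGetD
              ((PySem.List.pyRange 0 ((r0.length : Nat) : Int) 1).foldl (fun rm j =>
                (PySem.List.pyRange 0 (((r0 :: rest) : List (List Int)).length : Int) 1).foldl (fun rm i =>
                  PySem.List.pySetD rm i
                    (PySem.List.pySetD (PySem.List.pyGetD rm i []) j
                      (PySem.List.pyGetD cm j 0 - PySem.List.pyGetD (PySem.List.pyGetD rm i []) j 0))) rm)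
                (r0 :: rest))
              i [])
            (fun x => x)).getD 0))
        ((PySem.List.min?
          ((PySem.List.pyRange 0 (((r0 :: rest) : List (List Int)).length : Int) 1).map (fun i =>
            (PySem.List.max?
              (PySem.List.pyGetD
                ((PySem.List.pyRange 0 ((r0.length : Nat) : Int) 1).foldl (fun rm j =>
                  (PySem.List.pyRange 0 (((r0 :: rest) : List (List Int)).length : Int) 1).foldl (fun rm i =>
                    PySem.List.pySetD rm i
                      (PySem.List.pySetD (PySem.List.pyGetD rm i []) j
                        (PySem.List.pyGetD cm j 0 - PySem.List.pyGetD (PySem.List.pyGetD rm i []) j 0))) rm)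
                  (r0 :: rest))
                i [])
              (fun x => x)).getD 0))
          (fun x => x)).getD 0)).getD 0 : Nat) : Int)
    = (runMinV (rest.map (fun row =>
          (PySem.List.max? (rowRegret (fun j => PySem.List.pyGetD cm j 0) 0 row) (fun x => x)).getD 0)) 0
        ((PySem.List.max? (rowRegret (fun j => PySem.List.pyGetD cm j 0) 0 r0) (fun x => x)).getD 0) 1).1 := by
  rw [outer_fold (r0 :: rest).length (fun j => PySem.List.pyGetD cm j 0)
        (PySem.List.pyRange 0 ((r0.length : Nat) : Int) 1) (r0 :: rest) rfl]
  -- rewrite each row's column fold into rowRegret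
  have hrowmap : ((r0 :: rest) : List (List Int)).map (fun row =>
      (PySem.List.pyRange 0 ((r0.length : Nat) : Int) 1).foldl (fun r j =>
        PySem.List.pySetD r j (PySem.List.pyGetD cm j 0 - PySem.List.pyGetD r j 0)) row)
      = ((r0 :: rest) : List (List Int)).map (fun row =>
          rowRegret (fun j => PySem.List.pyGetD cm j 0) 0 row) := by
    apply List.map_congr_left
    intro row hrow
    rw [← hlen row hrow]
    exact colfold_zero (fun j => PySem.List.pyGetD cm j 0) row
  rw [hrowmap]
  have hlen2 : (((r0 :: rest) : List (List Int)).length : Int)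
      = ((((r0 :: rest) : List (List Int)).map (fun row =>
          rowRegret (fun j => PySem.List.pyGetD cm j 0) 0 row)).length : Int) := by simp
  rw [hlen2]
  rw [map_get_pyRange (fun row => (PySem.List.max? row (fun x => x)).getD 0) ([] : List Int)
        (((r0 :: rest) : List (List Int)).map (fun row =>
          rowRegret (fun j => PySem.List.pyGetD cm j 0) 0 row))]
  rw [List.map_map]
  simp only [Function.comp_def, List.map_cons]
  rw [PySem.List.min?_id_cons]
  simp only [Option.getD_some]
  rw [argmin_bridge]

-- ---- B-side lemmas ----

-- Python's min over pairs keyed by the second component, as a running fold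
theorem min?_pair_cons (x : Int × Int) (t : List (Int × Int)) :
    PySem.List.min? (x :: t) (fun p => p.2)
      = some (t.foldl (fun b y => if y.2 < b.2 then y else b) x) := by
  simp only [PySem.List.min?, List.foldl_cons]
  induction t generalizing x with
  | nil => rfl
  | cons y ys ih =>
    simp only [List.foldl_cons]
    by_cases h : y.2 < x.2
    · rw [if_pos h, if_pos h]; exact ih y
    · rw [if_neg h, if_neg h]; exact ih x

-- the pair fold over an enumeration is the indexed first-min recursion
theorem pfold : ∀ (t : List Int) (bi bv k : Int),
    (PySem.List.enumerate t k).foldl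
        (fun (b : Int × Int) (y : Int × Int) => if y.2 < b.2 then y else b) (bi, bv)
      = runMinV t bi bv k := by
  intro t
  induction t with
  | nil => intro bi bv k; simp [PySem.List.enumerate_nil, runMinV]
  | cons x ts ih =>
    intro bi bv k
    rw [PySem.List.enumerate_cons]
    simp only [List.foldl_cons, runMinV]
    by_cases h : x < bv
    · rw [if_pos h, if_pos h]; exact ih k x (k + 1)
    · rw [if_neg h, if_neg h]; exact ih bi bv (k + 1)

-- zip(*m) on a rectangular nonempty matrix is the list of its columns
theorem zipStar_rect : ∀ (n : Nat) (m : List (List Int)), m ≠ [] → (∀ r ∈ m, r.length = n) →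
    zipStar n m = (List.range n).map (fun j => m.map (fun r => r.getD j 0)) := by
  intro n
  induction n with
  | zero => intro m _ _; simp [zipStar]
  | succ n ih =>
    intro m hm hlen
    have hcond : (m.isEmpty || m.any (fun r => r.isEmpty)) = false := by
      rw [Bool.or_eq_false_iff]
      constructor
      · simpa [List.isEmpty_iff] using hm
      · rw [List.any_eq_false]
        intro r hr
        have := hlen r hr
        simp only [List.isEmpty_iff]
        intro hnil
        rw [hnil] at this
        simp at this
    rw [zipStar, hcond]
    simp only [Bool.false_eq_true, if_false]
    have htail : zipStar n (m.map (fun r => r.tail))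
        = (List.range n).map (fun j => (m.map (fun r => r.tail)).map (fun r => r.getD j 0)) := by
      apply ih
      · simpa using hm
      · intro r hr
        obtain ⟨s, hs, rfl⟩ := List.mem_map.mp hr
        have := hlen s hs
        simp [List.length_tail, this]
    rw [htail, List.range_succ_eq_map, List.map_cons, List.map_map]
    congr 1
    · apply List.map_congr_left
      intro r _
      cases r <;> rfl
    · apply List.map_congr_left
      intro j _
      simp only [Function.comp_apply, List.map_map]
      apply List.map_congr_left
      intro r _
      cases r <;> rfl

-- the per-column update of the running regret vector
def stepL (r col : List Int) : List Int :=
  (r.zip col).map (fun p => max p.1 ((PySem.List.max? col (fun y => y)).getD 0 - p.2))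

-- once the accumulator is `some`, B's option fold is the plain fold of stepL
theorem foldOpt : ∀ (cols : List (List Int)) (r : List Int),
    cols.foldl (fun (reg : Option (List Int)) (col : List Int) =>
      match reg with
      | none => some (col.map (fun x => (PySem.List.max? col (fun y => y)).getD 0 - x))
      | some r => some ((r.zip col).map (fun p => max p.1 ((PySem.List.max? col (fun y => y)).getD 0 - p.2))))
      (some r)
    = some (cols.foldl stepL r) := by
  intro cols
  induction cols with
  | nil => intro r; rfl
  | cons c cs ih => intro r; simp only [List.foldl_cons]; exact ih (stepL r c)

theorem stepL_length (r col : List Int) (h : col.length = r.length) :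
    (stepL r col).length = r.length := by
  simp [stepL, h]

theorem stepAll_len : ∀ (cols : List (List Int)) (L : Nat), (∀ c ∈ cols, c.length = L) →
    ∀ r : List Int, r.length = L → (cols.foldl stepL r).length = L := by
  intro cols
  induction cols with
  | nil => intro L _ r hr; simpa using hr
  | cons c cs ih =>
    intro L hc r hr
    simp only [List.foldl_cons]
    exact ih L (fun c' hc' => hc c' (by simp [hc'])) _
      (by rw [stepL_length r c (by rw [hc c (by simp), hr])]; exact hr)

theorem stepL_getD (r col : List Int) (h : col.length = r.length) (i : Nat) (hi : i < r.length) :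
    (stepL r col).getD i 0
      = max (r.getD i 0) ((PySem.List.max? col (fun y => y)).getD 0 - col.getD i 0) := by
  have hlen : (stepL r col).length = r.length := stepL_length r col h
  rw [List.getD_eq_getElem _ _ (by rw [hlen]; exact hi)]
  simp only [stepL, List.getElem_map, List.getElem_zip]
  rw [List.getD_eq_getElem _ _ hi, List.getD_eq_getElem _ _ (by omega)]

theorem stepAll_getD : ∀ (cols : List (List Int)) (L : Nat), (∀ c ∈ cols, c.length = L) →
    ∀ r : List Int, r.length = L → ∀ i : Nat, i < L →
    (cols.foldl stepL r).getD i 0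
      = cols.foldl (fun a col => max a ((PySem.List.max? col (fun y => y)).getD 0 - col.getD i 0))
          (r.getD i 0) := by
  intro cols
  induction cols with
  | nil => intro L _ r _ i _; rfl
  | cons c cs ih =>
    intro L hc r hr i hi
    simp only [List.foldl_cons]
    rw [ih L (fun c' hc' => hc c' (by simp [hc'])) _
          (by rw [stepL_length r c (by rw [hc c (by simp), hr])]; exact hr) i hi]
    rw [stepL_getD r c (by rw [hc c (by simp), hr]) i (by omega)]

theorem rowRegret_eq_map_range (w : Int → Int) (row : List Int) (j0 : Int) :
    rowRegret w j0 row = (List.range row.length).map (fun (k : Nat) => w (j0 + (k : Int)) - row.getD k 0) := by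
  apply List.ext_getElem
  · simp [rowRegret_length]
  · intro k h1 h2
    have hk : k < row.length := by simpa [rowRegret_length] using h1
    rw [rowRegret_getElem w row j0 k hk]
    simp only [List.getElem_map, List.getElem_range]
    rw [List.getD_eq_getElem _ _ hk]

-- B's value, reduced to the same first-argmin recursion over the same row maxima
theorem B_to_runMin (w : Int → Int) (r0 : List Int) (rest : List (List Int))
    (hr0 : r0 ≠ [])
    (hlen : ∀ row ∈ (r0 :: rest), row.length = r0.length)
    (hw : ∀ j : Nat, j < r0.length →
        w (j : Int) = (PySem.List.max? (((r0 :: rest) : List (List Int)).map (fun r => r.getD j 0)) (fun y => y)).getD 0) :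
    savage_criterion_alt (r0 :: rest)
      = (runMinV (rest.map (fun row =>
            (PySem.List.max? (rowRegret w 0 row) (fun x => x)).getD 0)) 0
          ((PySem.List.max? (rowRegret w 0 r0) (fun x => x)).getD 0) 1).1 := by
  obtain ⟨n', hn⟩ : ∃ n', r0.length = n' + 1 := by
    cases r0 with
    | nil => exact absurd rfl hr0
    | cons a t => exact ⟨t.length, rfl⟩
  simp only [savage_criterion_alt, List.headD_cons]
  rw [zipStar_rect r0.length (r0 :: rest) (by simp) hlen, hn,
      List.range_succ_eq_map, List.map_cons, List.map_map]
  simp only [List.foldl_cons]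
  rw [foldOpt]
  -- the resulting regret vector is the list of row maxima of the regrets
  have hG : ((List.range n').map ((fun j => ((r0 :: rest) : List (List Int)).map (fun r => r.getD j 0)) ∘ Nat.succ)).foldl stepL
        ((((r0 :: rest) : List (List Int)).map (fun r => r.getD 0 0)).map
          (fun x => (PySem.List.max? (((r0 :: rest) : List (List Int)).map (fun r => r.getD 0 0)) (fun y => y)).getD 0 - x))
      = ((r0 :: rest) : List (List Int)).map (fun row =>
          (PySem.List.max? (rowRegret w 0 row) (fun x => x)).getD 0) := by
    have hL : ∀ c ∈ (List.range n').map ((fun j => ((r0 :: rest) : List (List Int)).map (fun r => r.getD j 0)) ∘ Nat.succ),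
        c.length = (r0 :: rest).length := by
      intro c hc
      obtain ⟨j, _, rfl⟩ := List.mem_map.mp hc
      simp
    have hRlen :
        ((((r0 :: rest) : List (List Int)).map (fun r => r.getD 0 0)).map
          (fun x => (PySem.List.max? (((r0 :: rest) : List (List Int)).map (fun r => r.getD 0 0)) (fun y => y)).getD 0 - x)).length
        = (r0 :: rest).length := by simp
    apply List.ext_getElem
    · rw [stepAll_len _ _ hL _ hRlen]; simp
    · intro i h1 h2
      have hi : i < (r0 :: rest).length := by
        rw [stepAll_len _ _ hL _ hRlen] at h1; exact h1
      rw [← List.getD_eq_getElem _ 0 h1, ← List.getD_eq_getElem _ 0 h2]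
      rw [stepAll_getD _ _ hL _ hRlen i hi]
      set row := ((r0 :: rest) : List (List Int))[i] with hrowdef
      have hrowlen : row.length = n' + 1 := by
        rw [← hn]; exact hlen row (List.getElem_mem hi)
      obtain ⟨x, xs, hrow⟩ : ∃ x xs, row = x :: xs := by
        cases hm : row with
        | nil => rw [hm] at hrowlen; simp at hrowlen
        | cons a t => exact ⟨a, t, rfl⟩
      have hxs : xs.length = n' := by
        rw [hrow] at hrowlen; simpa using hrowlen
      have hmapD : ∀ (j : Nat), (((r0 :: rest) : List (List Int)).map (fun r => r.getD j 0)).getD i 0 = row.getD j 0 := by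
        intro j
        rw [List.getD_eq_getElem _ _ (by simpa using hi), List.getElem_map]
      -- the initial accumulator entry is the first regret w 0 - row[0]
      have hw0 : w ((0 : Nat) : Int)
          = (PySem.List.max? (((r0 :: rest) : List (List Int)).map (fun r => r.getD 0 0)) (fun y => y)).getD 0 :=
        hw 0 (by omega)
      have hinit : ((((r0 :: rest) : List (List Int)).map (fun r => r.getD 0 0)).map
            (fun x => (PySem.List.max? (((r0 :: rest) : List (List Int)).map (fun r => r.getD 0 0)) (fun y => y)).getD 0 - x)).getD i 0
          = w 0 - row.getD 0 0 := by
        rw [List.getD_eq_getElem _ _ (by simpa using hi), List.getElem_map, List.getElem_map]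
        have hw0' : w 0
            = (PySem.List.max? (((r0 :: rest) : List (List Int)).map (fun r => r.getD 0 0)) (fun y => y)).getD 0 := by
          simpa using hw0
        rw [hw0', hrowdef]
      rw [hinit]
      -- the list of later regrets of this row
      have hlist : (List.range n').map (fun j =>
            (PySem.List.max? (((r0 :: rest) : List (List Int)).map (fun r => r.getD (j + 1) 0)) (fun y => y)).getD 0
              - (((r0 :: rest) : List (List Int)).map (fun r => r.getD (j + 1) 0)).getD i 0)
          = rowRegret w 1 xs := by
        rw [rowRegret_eq_map_range w xs 1, hxs]
        apply List.map_congr_left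
        intro j hj
        have hjn : j + 1 < r0.length := by
          rw [hn]; exact Nat.succ_lt_succ (List.mem_range.mp hj)
        rw [hmapD (j + 1), ← hw (j + 1) hjn]
        have hcast : ((j + 1 : Nat) : Int) = 1 + (j : Int) := by push_cast; ring
        rw [hcast]
        congr 1
        rw [hrow]
        rfl
      -- LHS: fold over the mapped columns; RHS: the row max of the regrets
      rw [List.foldl_map]
      simp only [Function.comp_apply, Nat.succ_eq_add_one]
      rw [List.getD_eq_getElem _ _ h2, List.getElem_map, ← hrowdef, hrow]
      show _ = (PySem.List.max? ((w 0 - x) :: rowRegret w (0 + 1) xs) (fun x => x)).getD 0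
      rw [PySem.List.max?_id_cons, Option.getD_some]
      have h01 : (0 : Int) + 1 = 1 := by norm_num
      rw [h01, ← hlist, List.foldl_map]
      rfl
  rw [hG]
  simp only [List.map_cons]
  rw [PySem.List.enumerate_cons]
  rw [min?_pair_cons ((0 : Int), (PySem.List.max? (rowRegret w 0 r0) (fun x => x)).getD 0)]
  simp only [Option.getD_some]
  have h01 : (0 : Int) + 1 = 1 := by norm_num
  rw [h01, pfold]

-- ===== VERDICT (by name: the statement is the Claim_ definition above) =====
theorem savage_criterion_spec : Claim_equal_savage_criterion := by
  intro matrix _hdom hpre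
  unfold Spec_savage_criterion
  obtain ⟨hne, hr0g, hlen⟩ := hpre
  obtain ⟨r0, rest, rfl⟩ : ∃ r0 rest, matrix = r0 :: rest := by
    cases matrix with
    | nil => exact absurd rfl hne
    | cons a t => exact ⟨a, t, rfl⟩
  have hr0 : r0 ≠ [] := by simpa using hr0g
  have hlen' : ∀ row ∈ (r0 :: rest), row.length = r0.length := by
    intro row hrow
    simpa using hlen row hrow
  simp only [savage_criterion, PySem.List.pyGetD_zero_cons]
  have hcol : ∀ j : Int,
      (PySem.List.pyRange 0 (((r0 :: rest) : List (List Int)).length : Int) 1).map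
        (fun i => PySem.List.pyGetD (PySem.List.pyGetD (r0 :: rest) i []) j 0)
      = ((r0 :: rest) : List (List Int)).map (fun row => PySem.List.pyGetD row j 0) :=
    fun j => map_get_pyRange (fun row => PySem.List.pyGetD row j 0) [] (r0 :: rest)
  simp only [hcol]
  rw [PySem.List.map_pyGetD_pyRange_zero']
  rw [A_to_runMin _ r0 rest hlen']
  refine (B_to_runMin _ r0 rest hr0 hlen' ?_).symm
  intro j hj
  rw [PySem.List.pyGetD_map_pyRange _ r0.length j 0 hj]
  simp [PySem.List.pyGetD_natCast]
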